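-- pv_equiv track=rewrite | github.com/4tnetse/FabricStudio-GCP-Manager | backend/services/gcp_billing.py | _get_sku_desc_prefix
-- ===== SOURCE A (Python) =====
-- def _get_sku_desc_prefix(machine_type: str) -> str | None:
--     """Return the SKU description prefix for a given machine type, or None if unsupported."""
--     mt = machine_type.lower()
--     # Families that use "Predefined"/"Custom" in SKU descriptions
--     standard_families = [
--         ("n1-", "N1"),
--         ("n2d-", "N2D AMD"),
--         ("n2-", "N2"),
--         ("n4-", "N4"),
--         ("c2d-", "C2D AMD"),
--         ("c2-", "C2"),
--         ("c3d-", "C3D AMD"),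
--         ("c3-", "C3"),
--         ("t2d-", "T2D AMD"),
--         ("t2a-", "T2A ARM"),
--         ("m1-", "M1"),
--         ("m2-", "M2"),
--         ("m3-", "M3"),
--         ("a2-", "A2"),
--         ("a3-", "A3"),
--     ]
--     for prefix, family in standard_families:
--         if mt.startswith(prefix):
--             kind = "custom" if "custom" in mt else "predefined"
--             return f"{family} {kind} instance"
--
--     # E2: shared-core variants have flat pricing; predefined uses "E2 Instance" (no "Predefined")
--     if mt.startswith("e2-micro") or mt.startswith("e2-small"):
--         return None
--     if mt.startswith("e2-"):
--         return "E2 Custom Instance" if "custom" in mt else "E2 Instance"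
--
--     return None
-- ===== SOURCE B (Python) =====
-- _FAMILIES = {
--     "n1": "N1", "n2d": "N2D AMD", "n2": "N2", "n4": "N4",
--     "c2d": "C2D AMD", "c2": "C2", "c3d": "C3D AMD", "c3": "C3",
--     "t2d": "T2D AMD", "t2a": "T2A ARM",
--     "m1": "M1", "m2": "M2", "m3": "M3", "a2": "A2", "a3": "A3",
-- }
--
--
-- def _get_sku_desc_prefix(machine_type: str) -> str | None:
--     """Return the SKU description prefix for a given machine type, or None if unsupported."""
--     mt = machine_type.lower()
--     head, sep, _tail = mt.partition("-")
--     if sep: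
--         family = _FAMILIES.get(head)
--         if family is not None:
--             kind = "custom" if "custom" in mt else "predefined"
--             return f"{family} {kind} instance"
--     # E2: shared-core variants have flat pricing; predefined uses "E2 Instance" (no "Predefined")
--     if mt.startswith("e2-micro") or mt.startswith("e2-small"):
--         return None
--     if mt.startswith("e2-"):
--         return "E2 Custom Instance" if "custom" in mt else "E2 Instance"
--     return None
-- ===== Notes on version B (the rewrite author's own statement) =====
-- stated objective: idiomatic
-- what changed: B replaces A's sequential startswith scan over 15 dash-suffixed prefixes by parsing the family token before the first '-' once (str.partition) and doing a single dict lookup, with the E2 special cases kept as explicit startswith checks.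
import Mathlib
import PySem

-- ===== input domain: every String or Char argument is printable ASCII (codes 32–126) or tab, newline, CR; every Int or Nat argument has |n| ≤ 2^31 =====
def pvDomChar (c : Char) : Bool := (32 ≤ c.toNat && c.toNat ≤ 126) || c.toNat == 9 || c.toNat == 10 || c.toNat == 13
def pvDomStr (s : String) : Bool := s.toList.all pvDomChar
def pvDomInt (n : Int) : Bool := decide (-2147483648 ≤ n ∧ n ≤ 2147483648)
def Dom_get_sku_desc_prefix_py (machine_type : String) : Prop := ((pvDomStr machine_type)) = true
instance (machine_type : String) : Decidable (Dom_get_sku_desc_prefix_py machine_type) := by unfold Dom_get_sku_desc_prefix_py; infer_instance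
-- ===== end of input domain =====

-- B replaces A's sequential startswith scan over 15 dashed prefixes by parsing the family token
-- before the first '-' once and looking it up in a dict (objective: idiomatic; same result).


-- ===== PORT A =====
-- the "for prefix, family in standard_families" loop: first prefix match returns, else fall through
def pvAFamLoop (mt : String) : List (String × String) → Option String
  | [] => none
  | (pre, family) :: rest =>
    if PySem.Str.startswith mt pre then
      some (family ++ " " ++ (if PySem.Str.isIn "custom" mt then "custom" else "predefined") ++ " instance")
    else pvAFamLoop mt rest

def pvAStandardFamilies : List (String × String) :=
  [("n1-", "N1"), ("n2d-", "N2D AMD"), ("n2-", "N2"), ("n4-", "N4"),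
   ("c2d-", "C2D AMD"), ("c2-", "C2"), ("c3d-", "C3D AMD"), ("c3-", "C3"),
   ("t2d-", "T2D AMD"), ("t2a-", "T2A ARM"), ("m1-", "M1"), ("m2-", "M2"),
   ("m3-", "M3"), ("a2-", "A2"), ("a3-", "A3")]

def get_sku_desc_prefix_py (machine_type : String) : Option String :=
  let mt := PySem.Str.lower machine_type
  match pvAFamLoop mt pvAStandardFamilies with
  | some r => some r
  | none =>
    if PySem.Str.startswith mt "e2-micro" || PySem.Str.startswith mt "e2-small" then none
    else if PySem.Str.startswith mt "e2-" then
      some (if PySem.Str.isIn "custom" mt then "E2 Custom Instance" else "E2 Instance")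
    else none

-- ===== PORT B =====
def pvBFamilies : PySem.Dict String String :=
  PySem.Dict.ofList
    [("n1", "N1"), ("n2d", "N2D AMD"), ("n2", "N2"), ("n4", "N4"),
     ("c2d", "C2D AMD"), ("c2", "C2"), ("c3d", "C3D AMD"), ("c3", "C3"),
     ("t2d", "T2D AMD"), ("t2a", "T2A ARM"), ("m1", "M1"), ("m2", "M2"),
     ("m3", "M3"), ("a2", "A2"), ("a3", "A3")]

-- Source B's shared E2 tail
def pvBE2 (mt : String) : Option String :=
  if PySem.Str.startswith mt "e2-micro" || PySem.Str.startswith mt "e2-small" then none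
  else if PySem.Str.startswith mt "e2-" then
    some (if PySem.Str.isIn "custom" mt then "E2 Custom Instance" else "E2 Instance")
  else none

def get_sku_desc_prefix_py_alt (machine_type : String) : Option String :=
  let mt := PySem.Str.lower machine_type
  -- mt.partition("-") for the one-char separator "-", step for step and exact: head is the part
  -- before the first '-' (takeWhile), the separator part is nonempty iff a '-' occurs (dropWhile)
  let head := String.ofList (mt.toList.takeWhile (· ≠ '-'))
  if !(mt.toList.dropWhile (· ≠ '-')).isEmpty then
    match pvBFamilies.get? head with
    | some family =>
      some (family ++ " " ++ (if PySem.Str.isIn "custom" mt then "custom" else "predefined") ++ " instance")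
    | none => pvBE2 mt
  else pvBE2 mt

-- ===== PRECONDITION & SPEC =====
def Spec_get_sku_desc_prefix_py (machine_type : String) (out : Option String) : Prop := out = get_sku_desc_prefix_py_alt machine_type
instance (machine_type : String) (out : Option String) : Decidable (Spec_get_sku_desc_prefix_py machine_type out) := by unfold Spec_get_sku_desc_prefix_py; infer_instance

-- ===== CLAIM (what is proved, stated in full; the proofs are below) =====
def Claim_equal_get_sku_desc_prefix_py : Prop := ∀ (machine_type : String), Dom_get_sku_desc_prefix_py machine_type → Spec_get_sku_desc_prefix_py machine_type (get_sku_desc_prefix_py machine_type)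

-- ===== LEMMAS AND PROOFS =====

-- splitting a list at an explicit first '-' (the token t before it is dash-free)
lemma pv_split_dash (t r : List Char) (ht : '-' ∉ t) :
    (t ++ '-' :: r).takeWhile (fun c => decide (c ≠ '-')) = t ∧
    (t ++ '-' :: r).dropWhile (fun c => decide (c ≠ '-')) = '-' :: r := by
  induction t with
  | nil => simp
  | cons a as ih =>
    have ha : ¬ a = '-' := by rintro rfl; simp at ht
    have h2 := ih fun h => ht (List.mem_cons_of_mem _ h)
    simp at h2 ⊢
    simp [ha, h2]

-- for a dash-free token t: "s startswith t+'-'" ⟺ the part before the first '-' is t and '-' occurs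
lemma pv_startswith_token (s t : List Char) (ht : '-' ∉ t) :
    PySem.Chars.startswith s (t ++ ['-']) = true ↔
      (s.takeWhile (fun c => decide (c ≠ '-')) = t ∧ s.dropWhile (fun c => decide (c ≠ '-')) ≠ []) := by
  rw [PySem.Chars.startswith_iff]
  constructor
  · rintro ⟨r, hr⟩
    have hs : s = t ++ '-' :: r := by rw [← hr]; simp
    rw [hs, (pv_split_dash t r ht).1, (pv_split_dash t r ht).2]
    simp
  · rintro ⟨htk, hdr⟩
    obtain ⟨c, cs, hc⟩ := List.exists_cons_of_ne_nil hdr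
    have hceq : c = '-' := by
      have hh := List.head_dropWhile_not (p := fun c => decide (c ≠ '-')) (l := s) hdr
      have hc' : List.dropWhile (fun c => !decide (c = '-')) s = c :: cs := by simpa using hc
      simpa [hc'] using hh
    refine ⟨cs, ?_⟩
    have hsplit := List.takeWhile_append_dropWhile (p := fun c => decide (c ≠ '-')) (l := s)
    rw [htk, hc, hceq] at hsplit
    simpa using hsplit

-- A's prefix loop over dash-suffixed tokens = one dict lookup of the token before the first '-'
lemma pv_loop_eq_lookup (mt : String) (toks : List (List Char × String))
    (htoks : ∀ q ∈ toks, '-' ∉ q.1) :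
    pvAFamLoop mt (toks.map (fun q => (String.ofList (q.1 ++ ['-']), q.2))) =
      (if mt.toList.dropWhile (fun c => decide (c ≠ '-')) ≠ [] then
        (PySem.Dict.mk (toks.map (fun q => (String.ofList q.1, q.2)))).get?
          (String.ofList (mt.toList.takeWhile (fun c => decide (c ≠ '-'))))
       else none).map
        (fun family => family ++ " " ++ (if PySem.Str.isIn "custom" mt then "custom" else "predefined") ++ " instance") := by
  induction toks with
  | nil =>
    simp only [List.map_nil, pvAFamLoop]
    by_cases hsep : mt.toList.dropWhile (fun c => decide (c ≠ '-')) = []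
    · rw [if_neg (not_not_intro hsep)]; rfl
    · rw [if_pos hsep]; simp [PySem.Dict.get?]
  | cons q rest ih =>
    obtain ⟨t, fam⟩ := q
    have ht : '-' ∉ t := htoks ⟨t, fam⟩ (List.mem_cons_self ..)
    have hrest : ∀ q ∈ rest, '-' ∉ q.1 := fun q hq => htoks q (List.mem_cons_of_mem _ hq)
    simp only [List.map_cons, pvAFamLoop]
    have hsw : PySem.Str.startswith mt (String.ofList (t ++ ['-'])) =
        PySem.Chars.startswith mt.toList (t ++ ['-']) := by
      rw [PySem.Str.startswith_eq]; simp
    by_cases hsep : mt.toList.dropWhile (fun c => decide (c ≠ '-')) = []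
    · have hfalse : PySem.Chars.startswith mt.toList (t ++ ['-']) = false := by
        rw [Bool.eq_false_iff]
        intro hcon
        exact (pv_startswith_token mt.toList t ht |>.mp hcon).2 hsep
      rw [hsw, hfalse, if_neg Bool.false_ne_true, ih hrest, if_neg (not_not_intro hsep),
        if_neg (not_not_intro hsep)]
    · have ih' := ih hrest
      rw [if_pos hsep] at ih' ⊢
      by_cases heq : mt.toList.takeWhile (fun c => decide (c ≠ '-')) = t
      · have htrue : PySem.Chars.startswith mt.toList (t ++ ['-']) = true :=
          (pv_startswith_token mt.toList t ht).mpr ⟨heq, hsep⟩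
        rw [hsw, htrue, if_pos rfl, PySem.Dict.get?_mk_cons]
        have hb : (String.ofList t == String.ofList (mt.toList.takeWhile (fun c => decide (c ≠ '-')))) = true := by
          rw [heq]; exact beq_self_eq_true _
        rw [hb, if_pos rfl]
        rfl
      · have hfalse : PySem.Chars.startswith mt.toList (t ++ ['-']) = false := by
          rw [Bool.eq_false_iff]
          intro hcon
          exact heq (pv_startswith_token mt.toList t ht |>.mp hcon).1
        have hb : (String.ofList t == String.ofList (mt.toList.takeWhile (fun c => decide (c ≠ '-')))) = false := by
          rw [beq_eq_false_iff_ne]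
          intro hcon
          exact heq ((by simpa using congrArg String.toList hcon : t = _)).symm
        rw [hsw, hfalse, if_neg Bool.false_ne_true, PySem.Dict.get?_mk_cons, hb, if_neg Bool.false_ne_true]
        exact ih'

-- pvAStandardFamilies and pvBFamilies as one token list, dash-suffixed resp. bare
def pvToks : List (List Char × String) :=
  [(['n','1'], "N1"), (['n','2','d'], "N2D AMD"), (['n','2'], "N2"), (['n','4'], "N4"),
   (['c','2','d'], "C2D AMD"), (['c','2'], "C2"), (['c','3','d'], "C3D AMD"), (['c','3'], "C3"),
   (['t','2','d'], "T2D AMD"), (['t','2','a'], "T2A ARM"), (['m','1'], "M1"), (['m','2'], "M2"),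
   (['m','3'], "M3"), (['a','2'], "A2"), (['a','3'], "A3")]

lemma pv_main (machine_type : String) :
    get_sku_desc_prefix_py machine_type = get_sku_desc_prefix_py_alt machine_type := by
  simp only [get_sku_desc_prefix_py, get_sku_desc_prefix_py_alt]
  have hfams : pvAStandardFamilies = pvToks.map (fun q => (String.ofList (q.1 ++ ['-']), q.2)) := by decide
  have hdict : pvBFamilies = PySem.Dict.mk (pvToks.map (fun q => (String.ofList q.1, q.2))) := by decide
  rw [hfams, pv_loop_eq_lookup (PySem.Str.lower machine_type) pvToks (by decide), ← hdict]
  set mt := PySem.Str.lower machine_type with hmt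
  by_cases hsep : mt.toList.dropWhile (fun c => decide (c ≠ '-')) = []
  · rw [if_neg (not_not_intro hsep)]
    have hie : (mt.toList.dropWhile (fun c => decide (c ≠ '-'))).isEmpty = true := by
      rw [hsep]; rfl
    rw [hie]
    rfl
  · rw [if_pos hsep]
    have hie : (mt.toList.dropWhile (fun c => decide (c ≠ '-'))).isEmpty = false := by
      rw [Bool.eq_false_iff]
      intro h
      exact hsep (by rwa [List.isEmpty_iff] at h)
    rw [hie]
    cases hget : pvBFamilies.get? (String.ofList (mt.toList.takeWhile (fun c => decide (c ≠ '-')))) with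
    | none => rfl
    | some fam => rfl

-- ===== VERDICT (by name: the statement is the Claim_ definition above) =====
theorem get_sku_desc_prefix_py_spec : Claim_equal_get_sku_desc_prefix_py := by
  intro machine_type _
  unfold Spec_get_sku_desc_prefix_py
  exact pv_main machine_type
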